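-- pv_equiv track=rewrite | github.com/Shreek195/A2OJ-Ladder | Codeforces Rating < 1300/227BEffectiveApproach.py | approach
-- ===== SOURCE A (Python) =====
-- def approach(n, nums, m, search):
--     v, p = 0, 0
--
--     ele_count = {}
--     for val in search:
--         ele_count[val] = ele_count.get(val, 0) + 1
--
--     for i, val in enumerate(nums):
--         if val in ele_count:
--             count = ele_count[val]
--             v += (i + 1) * count
--             p += (n - i) * count
--
--     return f"{v} {p}"
-- ===== SOURCE B (Python) =====
-- def approach(n, nums, m, search):
--     # Index nums once: value -> (sum of forward positions i+1, sum of backward positions n-i)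
--     idx = {}
--     for i, val in enumerate(nums):
--         f, b = idx.get(val, (0, 0))
--         idx[val] = (f + i + 1, b + n - i)
--
--     v, p = 0, 0
--     for q in search:
--         f, b = idx.get(q, (0, 0))
--         v += f
--         p += b
--
--     return f"{v} {p}"
-- ===== Notes on version B (the rewrite author's own statement) =====
-- stated objective: alternative
-- what changed: Instead of counting the search queries and then scanning nums (adding (i+1)*count and (n-i)*count), B indexes nums once into a dict mapping each value to its accumulated positional sums (sum of i+1, sum of n-i) and then scans search, adding the stored pair per query; the summation is exchanged from nums-major to search-major order.
import Mathlib
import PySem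

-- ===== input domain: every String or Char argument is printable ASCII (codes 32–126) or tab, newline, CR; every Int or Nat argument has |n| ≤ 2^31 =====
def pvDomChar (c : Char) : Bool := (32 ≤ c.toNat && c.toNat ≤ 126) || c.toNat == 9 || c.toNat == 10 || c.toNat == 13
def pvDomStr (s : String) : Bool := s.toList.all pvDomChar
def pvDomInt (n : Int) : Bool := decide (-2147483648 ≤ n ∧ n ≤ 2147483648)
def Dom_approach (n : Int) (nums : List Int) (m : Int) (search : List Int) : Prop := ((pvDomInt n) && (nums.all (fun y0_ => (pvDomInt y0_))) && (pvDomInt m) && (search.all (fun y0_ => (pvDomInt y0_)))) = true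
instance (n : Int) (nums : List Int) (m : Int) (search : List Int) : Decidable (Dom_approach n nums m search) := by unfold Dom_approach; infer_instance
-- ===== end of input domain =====

-- B inverts the data structure: instead of counting search queries and scanning nums,
-- it indexes nums once with per-value positional sums and then scans search (alternative
-- decomposition, same asymptotic cost).

-- ===== PORT A =====
def approach (n : Int) (nums : List Int) (m : Int) (search : List Int) : String :=
  let ele_count : PySem.Dict Int Int :=
    search.foldl (fun d val => d.insert val (d.getD val 0 + 1)) PySem.Dict.empty
  let vp : Int × Int :=
    (PySem.List.enumerate nums).foldl
      (fun (s : Int × Int) (iv : Int × Int) =>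
        if ele_count.contains iv.2 then
          let count := ele_count.getD iv.2 0
          (s.1 + (iv.1 + 1) * count, s.2 + (n - iv.1) * count)
        else s)
      (0, 0)
  PySem.Int.toStr vp.1 ++ " " ++ PySem.Int.toStr vp.2

-- ===== PORT B =====
def approach_alt (n : Int) (nums : List Int) (m : Int) (search : List Int) : String :=
  let idx : PySem.Dict Int (Int × Int) :=
    (PySem.List.enumerate nums).foldl
      (fun d (iv : Int × Int) =>
        let fb := d.getD iv.2 (0, 0)
        d.insert iv.2 (fb.1 + iv.1 + 1, fb.2 + n - iv.1))
      PySem.Dict.empty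
  let vp : Int × Int :=
    search.foldl
      (fun (s : Int × Int) q =>
        let fb := idx.getD q (0, 0)
        (s.1 + fb.1, s.2 + fb.2))
      (0, 0)
  PySem.Int.toStr vp.1 ++ " " ++ PySem.Int.toStr vp.2

-- ===== PRECONDITION & SPEC =====
def Spec_approach (n : Int) (nums : List Int) (m : Int) (search : List Int) (out : String) : Prop := out = approach_alt n nums m search
instance (n : Int) (nums : List Int) (m : Int) (search : List Int) (out : String) : Decidable (Spec_approach n nums m search out) := by unfold Spec_approach; infer_instance

-- ===== CLAIM (what is proved, stated in full; the proofs are below) =====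
def Claim_equal_approach : Prop := ∀ (n : Int) (nums : List Int) (m : Int) (search : List Int), Dom_approach n nums m search → Spec_approach n nums m search (approach n nums m search)

-- ===== LEMMAS AND PROOFS =====

-- B's index dict: the stored pair at x is the pair of positional sums over the matching entries.
theorem idxFold_getD (n : Int) (l : List (Int × Int)) (d : PySem.Dict Int (Int × Int)) (x : Int) :
    (l.foldl (fun d iv =>
        let fb := d.getD iv.2 (0, 0)
        d.insert iv.2 (fb.1 + iv.1 + 1, fb.2 + n - iv.1)) d).getD x (0, 0)
    = ((d.getD x (0, 0)).1 + ((l.filter (fun iv => iv.2 == x)).map (fun iv => iv.1 + 1)).sum,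
       (d.getD x (0, 0)).2 + ((l.filter (fun iv => iv.2 == x)).map (fun iv => n - iv.1)).sum) := by
  induction l generalizing d with
  | nil => simp
  | cons p t ih =>
    simp only [List.foldl_cons, List.filter_cons]
    rw [ih]
    by_cases h : p.2 = x
    · simp [h]
      constructor <;> ring
    · simp [PySem.Dict.getD_insert, h, beq_iff_eq, Ne.symm h]

-- generic: a sum of an indicator-selected term is the sum over the filter
theorem sum_map_ite (l : List (Int × Int)) (f : Int × Int → Int) (q : Int) :
    (l.map (fun p => if p.2 = q then f p else 0)).sum
    = ((l.filter (fun p => p.2 == q)).map f).sum := by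
  induction l with
  | nil => simp
  | cons p t ih =>
    by_cases h : p.2 = q <;> simp [h, ih]

-- exchange of summation between search-major and nums-major order
theorem sum_swap (l : List (Int × Int)) (search : List Int) (f : Int × Int → Int) :
    (search.map (fun q => ((l.filter (fun p => p.2 == q)).map f).sum)).sum
    = (l.map (fun p => f p * (search.count p.2 : Int))).sum := by
  induction search with
  | nil => simp
  | cons q t ih =>
    simp only [List.map_cons, List.sum_cons, ih]
    have hc : ∀ p : Int × Int, ((List.count p.2 (q :: t) : Nat) : Int)
        = (if p.2 = q then 1 else 0) + (List.count p.2 t : Int) := by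
      intro p
      by_cases h : p.2 = q
      · simp [h]; ring
      · have h' : ¬ q = p.2 := fun e => h e.symm
        simp [h, h']
    calc ((l.filter (fun p => p.2 == q)).map f).sum + (l.map (fun p => f p * (t.count p.2 : Int))).sum
        = (l.map (fun p => if p.2 = q then f p else 0)).sum
          + (l.map (fun p => f p * (t.count p.2 : Int))).sum := by
            rw [sum_map_ite]
      _ = (l.map (fun p => (if p.2 = q then f p else 0) + f p * (t.count p.2 : Int))).sum := by
            rw [← PySem.List.sum_map_add_int]
      _ = (l.map (fun p => f p * ((q :: t).count p.2 : Int))).sum := by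
            apply congrArg
            apply List.map_congr_left
            intro p _
            rw [hc p]
            by_cases h : p.2 = q
            · simp [h]; ring
            · simp [h]

-- A's counter lookup is the count, and membership is membership in search
theorem counter_getD (search : List Int) (x : Int) :
    (search.foldl (fun d val => d.insert val (d.getD val 0 + 1)) (PySem.Dict.empty : PySem.Dict Int Int)).getD x 0
    = (search.count x : Int) := by
  rw [PySem.Dict.getD_foldl_insert_add_one]
  simp

theorem counter_contains (search : List Int) (x : Int) :
    (search.foldl (fun d val => d.insert val (d.getD val 0 + 1)) (PySem.Dict.empty : PySem.Dict Int Int)).contains x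
    = decide (x ∈ search) := by
  rw [PySem.Dict.foldl_insert_getD_add_one_eq_counter, PySem.Dict.contains_counter]
  simp

-- A's loop computes the nums-major weighted sums
theorem approach_eq (n : Int) (nums : List Int) (m : Int) (search : List Int) :
    approach n nums m search
    = PySem.Int.toStr (((PySem.List.enumerate nums).map
          (fun p => (p.1 + 1) * (search.count p.2 : Int))).sum)
      ++ " "
      ++ PySem.Int.toStr (((PySem.List.enumerate nums).map
          (fun p => (n - p.1) * (search.count p.2 : Int))).sum) := by
  unfold approach
  dsimp only
  simp only [counter_contains, counter_getD]
  have hstep : ∀ (s : Int × Int), ∀ iv ∈ PySem.List.enumerate nums,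
      (if decide (iv.2 ∈ search) = true then
        ((s.1 + (iv.1 + 1) * (search.count iv.2 : Int),
          s.2 + (n - iv.1) * (search.count iv.2 : Int)) : Int × Int)
      else s)
      = (s.1 + (iv.1 + 1) * (search.count iv.2 : Int), s.2 + (n - iv.1) * (search.count iv.2 : Int)) := by
    intro s iv _
    by_cases h : iv.2 ∈ search
    · simp [h]
    · have : search.count iv.2 = 0 := List.count_eq_zero.mpr h
      simp [h, this]
  rw [PySem.List.foldl_congr_mem _ _ _ _ hstep]
  rw [PySem.List.foldl_prod_mk
    (f := fun acc (iv : Int × Int) => acc + (iv.1 + 1) * (search.count iv.2 : Int))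
    (g := fun acc (iv : Int × Int) => acc + (n - iv.1) * (search.count iv.2 : Int))]
  rw [PySem.List.foldl_add, PySem.List.foldl_add]
  simp

-- B's loop computes the search-major sums
theorem approach_alt_eq (n : Int) (nums : List Int) (m : Int) (search : List Int) :
    approach_alt n nums m search
    = PySem.Int.toStr ((search.map (fun q =>
          (((PySem.List.enumerate nums).filter (fun p => p.2 == q)).map (fun p => p.1 + 1)).sum)).sum)
      ++ " "
      ++ PySem.Int.toStr ((search.map (fun q =>
          (((PySem.List.enumerate nums).filter (fun p => p.2 == q)).map (fun p => n - p.1)).sum)).sum) := by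
  unfold approach_alt
  dsimp only
  simp only [idxFold_getD, PySem.Dict.getD_empty, zero_add]
  have hstep : ∀ (s : Int × Int), ∀ q ∈ search,
      ((s.1 + (((PySem.List.enumerate nums).filter (fun p => p.2 == q)).map (fun p => p.1 + 1)).sum,
        s.2 + (((PySem.List.enumerate nums).filter (fun p => p.2 == q)).map (fun p => n - p.1)).sum) : Int × Int)
      = (s.1 + (((PySem.List.enumerate nums).filter (fun p => p.2 == q)).map (fun p => p.1 + 1)).sum,
         s.2 + (((PySem.List.enumerate nums).filter (fun p => p.2 == q)).map (fun p => n - p.1)).sum) := by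
    intro s q _
    rfl
  rw [PySem.List.foldl_congr_mem _ _ _ _ hstep]
  rw [PySem.List.foldl_prod_mk
    (f := fun acc q => acc + (((PySem.List.enumerate nums).filter (fun p => p.2 == q)).map (fun p => p.1 + 1)).sum)
    (g := fun acc q => acc + (((PySem.List.enumerate nums).filter (fun p => p.2 == q)).map (fun p => n - p.1)).sum)]
  rw [PySem.List.foldl_add, PySem.List.foldl_add]
  simp

-- ===== VERDICT (by name: the statement is the Claim_ definition above) =====
theorem approach_spec : Claim_equal_approach := by
  intro n nums m search _
  unfold Spec_approach
  rw [approach_eq, approach_alt_eq, sum_swap, sum_swap]
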